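-- pv_equiv track=rewrite | github.com/mrvcode/RetosPython | roadmap_31_50/batmanDay.py | sum_subgrid_alert
-- ===== SOURCE A (Python) =====
-- def sum_subgrid_alert(sensors, center_x, center_y) -> int:
--     total = 0
--     for x in range(center_x - 1, center_x + 2):
--         for y in range(center_y - 1, center_y + 2):
--             for sensor in sensors:
--                 if sensor[0] == x and sensor[1] == y:
--                     total += sensor[2]
--     return total
-- ===== SOURCE B (Python) =====
-- def sum_subgrid_alert(sensors, center_x, center_y) -> int:
--     total = 0
--     for sensor in sensors:
--         if sensor[0] in (center_x - 1, center_x, center_x + 1) and \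
--            sensor[1] in (center_y - 1, center_y, center_y + 1):
--             total += sensor[2]
--     return total
-- ===== Notes on version B (the rewrite author's own statement) =====
-- stated objective: faster
-- what changed: Single pass over the sensor list with a constant-size membership test on each coordinate, instead of nine full rescans of the list (one per cell of the 3x3 block).
import Mathlib
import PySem

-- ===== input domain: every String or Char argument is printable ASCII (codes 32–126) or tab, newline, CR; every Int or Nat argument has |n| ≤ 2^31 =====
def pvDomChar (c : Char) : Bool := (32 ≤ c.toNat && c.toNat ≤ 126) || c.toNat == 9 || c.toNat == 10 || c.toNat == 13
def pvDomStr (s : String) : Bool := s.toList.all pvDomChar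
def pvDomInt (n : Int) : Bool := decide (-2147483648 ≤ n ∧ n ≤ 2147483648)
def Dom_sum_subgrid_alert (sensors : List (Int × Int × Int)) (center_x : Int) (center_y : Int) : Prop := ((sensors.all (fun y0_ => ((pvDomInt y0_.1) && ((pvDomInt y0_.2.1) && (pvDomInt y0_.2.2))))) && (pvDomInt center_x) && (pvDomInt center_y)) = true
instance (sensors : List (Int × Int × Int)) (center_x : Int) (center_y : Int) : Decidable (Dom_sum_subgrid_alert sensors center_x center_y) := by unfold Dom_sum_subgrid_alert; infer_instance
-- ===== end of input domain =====

-- B replaces A's nine full rescans of the sensor list (one per cell of the 3x3 block)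
-- by a single pass with a constant-size membership test on each coordinate.

-- ===== PORT A =====
-- literal port of A: for x in range(cx-1, cx+2): for y in range(cy-1, cy+2): for sensor in sensors: ...
def sum_subgrid_alert (sensors : List (Int × Int × Int)) (center_x : Int) (center_y : Int) : Int :=
  (PySem.List.pyRange (center_x - 1) (center_x + 2) 1).foldl (fun total x =>
    (PySem.List.pyRange (center_y - 1) (center_y + 2) 1).foldl (fun total y =>
      sensors.foldl (fun total sensor =>
        if sensor.1 = x ∧ sensor.2.1 = y then total + sensor.2.2 else total) total) total) 0

-- ===== PORT B =====
-- literal port of B: one pass; membership test 'sensor[0] in (cx-1, cx, cx+1)' etc.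
def sum_subgrid_alert_alt (sensors : List (Int × Int × Int)) (center_x : Int) (center_y : Int) : Int :=
  sensors.foldl (fun total sensor =>
    if (sensor.1 = center_x - 1 ∨ sensor.1 = center_x ∨ sensor.1 = center_x + 1) ∧
       (sensor.2.1 = center_y - 1 ∨ sensor.2.1 = center_y ∨ sensor.2.1 = center_y + 1)
    then total + sensor.2.2 else total) 0

-- ===== PRECONDITION & SPEC =====
def Spec_sum_subgrid_alert (sensors : List (Int × Int × Int)) (center_x : Int) (center_y : Int) (out : Int) : Prop := out = sum_subgrid_alert_alt sensors center_x center_y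
instance (sensors : List (Int × Int × Int)) (center_x : Int) (center_y : Int) (out : Int) : Decidable (Spec_sum_subgrid_alert sensors center_x center_y out) := by unfold Spec_sum_subgrid_alert; infer_instance

-- ===== CLAIM (what is proved, stated in full; the proofs are below) =====
def Claim_equal_sum_subgrid_alert : Prop := ∀ (sensors : List (Int × Int × Int)) (center_x : Int) (center_y : Int), Dom_sum_subgrid_alert sensors center_x center_y → Spec_sum_subgrid_alert sensors center_x center_y (sum_subgrid_alert sensors center_x center_y)

-- ===== LEMMAS AND PROOFS =====

-- sum of sensor[2] over the sensors satisfying p, as a fold (the common shape of both ports)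
def pvS (p : Int × Int × Int → Prop) [DecidablePred p] (l : List (Int × Int × Int)) : Int :=
  l.foldl (fun total s => if p s then total + s.2.2 else total) 0

theorem pvS_shift (p : Int × Int × Int → Prop) [DecidablePred p]
    (l : List (Int × Int × Int)) (init : Int) :
    l.foldl (fun total s => if p s then total + s.2.2 else total) init = init + pvS p l := by
  induction l generalizing init with
  | nil => simp [pvS]
  | cons a t ih =>
      simp only [pvS, List.foldl_cons]
      rw [ih, ih (if p a then 0 + a.2.2 else 0)]
      split_ifs <;> omega

theorem pvS_cons (p : Int × Int × Int → Prop) [DecidablePred p]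
    (a : Int × Int × Int) (l : List (Int × Int × Int)) :
    pvS p (a :: l) = (if p a then a.2.2 else 0) + pvS p l := by
  rw [show pvS p (a :: l)
        = l.foldl (fun total s => if p s then total + s.2.2 else total)
            (if p a then 0 + a.2.2 else 0) from rfl, pvS_shift]
  split_ifs <;> omega

theorem pvS_or (p q : Int × Int × Int → Prop) [DecidablePred p] [DecidablePred q]
    (l : List (Int × Int × Int)) (h : ∀ s, ¬(p s ∧ q s)) :
    pvS p l + pvS q l = pvS (fun s => p s ∨ q s) l := by
  induction l with
  | nil => simp [pvS]
  | cons a t ih =>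
      rw [pvS_cons p, pvS_cons q, pvS_cons (fun s => p s ∨ q s)]
      have ha := h a
      split_ifs <;> first | omega | tauto

theorem pvS_congr (p q : Int × Int × Int → Prop) [DecidablePred p] [DecidablePred q]
    (l : List (Int × Int × Int)) (h : ∀ s, p s ↔ q s) : pvS p l = pvS q l := by
  induction l with
  | nil => rfl
  | cons a t ih =>
      rw [pvS_cons p, pvS_cons q, ih]
      have ha := h a
      split_ifs <;> first | omega | tauto

theorem pvRange3 (a : Int) : PySem.List.pyRange (a - 1) (a + 2) 1 = [a - 1, a, a + 1] := by
  rw [PySem.List.pyRange_one]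
  have h3 : (a + 2 - (a - 1)).toNat = 3 := by omega
  rw [h3]
  simp [List.range_succ]
  omega

-- ===== VERDICT (by name: the statement is the Claim_ definition above) =====
theorem sum_subgrid_alert_spec : Claim_equal_sum_subgrid_alert := by
  intro sensors cx cy _
  unfold Spec_sum_subgrid_alert sum_subgrid_alert sum_subgrid_alert_alt
  rw [pvRange3 cx, pvRange3 cy]
  simp only [List.foldl_cons, List.foldl_nil]
  -- normalize every fold over sensors into a 0-based pvS
  repeat rw [pvS_shift]
  have key : pvS (fun s => s.1 = cx - 1 ∧ s.2.1 = cy - 1) sensors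
      + pvS (fun s => s.1 = cx - 1 ∧ s.2.1 = cy) sensors
      + pvS (fun s => s.1 = cx - 1 ∧ s.2.1 = cy + 1) sensors
      + pvS (fun s => s.1 = cx ∧ s.2.1 = cy - 1) sensors
      + pvS (fun s => s.1 = cx ∧ s.2.1 = cy) sensors
      + pvS (fun s => s.1 = cx ∧ s.2.1 = cy + 1) sensors
      + pvS (fun s => s.1 = cx + 1 ∧ s.2.1 = cy - 1) sensors
      + pvS (fun s => s.1 = cx + 1 ∧ s.2.1 = cy) sensors
      + pvS (fun s => s.1 = cx + 1 ∧ s.2.1 = cy + 1) sensors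
      = pvS (fun s => (s.1 = cx - 1 ∨ s.1 = cx ∨ s.1 = cx + 1) ∧
          (s.2.1 = cy - 1 ∨ s.2.1 = cy ∨ s.2.1 = cy + 1)) sensors := by
    rw [pvS_or _ _ _ (by intro s; omega), pvS_or _ _ _ (by intro s; omega),
        pvS_or _ _ _ (by intro s; omega), pvS_or _ _ _ (by intro s; omega),
        pvS_or _ _ _ (by intro s; omega), pvS_or _ _ _ (by intro s; omega),
        pvS_or _ _ _ (by intro s; omega), pvS_or _ _ _ (by intro s; omega)]
    exact pvS_congr _ _ _ (by intro s; constructor <;> (intro h; omega))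
  linarith [key]
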